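-- pv_equiv track=rewrite | github.com/skuxy/Advent-Of-Code-codes | 2017/day9.py | check_and_count_groups
-- ===== SOURCE A (Python) =====
-- def check_and_count_groups(stream):
--     stream = list(stream)
--     stack = []
--     count = 0
--     depth = 0
--     while stream:
--         char = stream.pop(0)
--         if char == '{':
--             depth += 1
--             stack.append(char)
--             continue
--         if char == '}':
--             if stack:
--                 stack.pop()
--                 count += depth
--                 depth -= 1
--     return count
-- ===== SOURCE B (Python) =====
-- def check_and_count_groups(stream):
--     # recursive-descent parser: one O(n) pass, no list copy / pop(0)
--     def parse(s, i, depth):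
--         score = 0
--         while i < len(s):
--             c = s[i]
--             i += 1
--             if c == '{':
--                 sub, i = parse(s, i, depth + 1)
--                 score += sub
--             elif c == '}' and depth > 0:
--                 return score + depth, i
--         return score, i
--     return parse(stream, 0, 0)[0]
-- ===== Notes on version B (the rewrite author's own statement) =====
-- stated objective: faster
-- what changed: Replaced A's stack-and-pop(0) iterative scan with a recursive-descent parser over the nested brace structure; no list copy, no quadratic pop(0), no explicit stack list.
import Mathlib
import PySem

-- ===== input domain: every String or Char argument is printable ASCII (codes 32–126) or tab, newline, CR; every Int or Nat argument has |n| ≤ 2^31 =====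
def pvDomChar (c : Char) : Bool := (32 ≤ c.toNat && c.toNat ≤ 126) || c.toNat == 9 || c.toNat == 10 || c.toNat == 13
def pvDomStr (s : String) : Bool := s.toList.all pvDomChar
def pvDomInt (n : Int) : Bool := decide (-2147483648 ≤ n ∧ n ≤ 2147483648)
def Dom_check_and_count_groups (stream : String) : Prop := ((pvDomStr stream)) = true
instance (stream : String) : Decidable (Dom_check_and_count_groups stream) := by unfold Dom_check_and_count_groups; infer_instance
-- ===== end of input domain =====

-- B replaces A's stack-and-pop(0) scan by a recursive-descent parser over the nested
-- brace structure (different decomposition; also avoids the quadratic pop(0)).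

-- ===== PORT A =====
-- literal port of A's while loop: state (remaining stream, stack, count, depth);
-- stream.pop(0) = take the head, stack.append(c) = ++ [c], stack.pop() = dropLast.
def loopA : List Char → List Char → Int → Int → Int
  | [], _, count, _ => count
  | c :: rest, stack, count, depth =>
    if c = '{' then
      loopA rest (stack ++ [c]) count (depth + 1)
    else if c = '}' then
      if stack ≠ [] then
        loopA rest stack.dropLast (count + depth) (depth - 1)
      else
        loopA rest stack count depth
    else
      loopA rest stack count depth

def check_and_count_groups (stream : String) : Int :=
  loopA stream.toList [] 0 0

-- ===== PORT B =====
-- recursive-descent helper of Source B (fuel ≥ remaining length only for termination):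
-- on '{' parse the nested group then continue at the same level; on '}' with depth > 0
-- return (score + depth, rest); at end of input return the score with rest = [].
def parseB : Nat → List Char → Int → Int × List Char
  | 0, s, _ => (0, s)
  | _ + 1, [], _ => (0, [])
  | f + 1, c :: rest, depth =>
    if c = '{' then
      let p := parseB f rest (depth + 1)
      let q := parseB f p.2 depth
      (p.1 + q.1, q.2)
    else if c = '}' ∧ 0 < depth then
      (depth, rest)
    else
      parseB f rest depth

def check_and_count_groups_alt (stream : String) : Int :=
  (parseB stream.toList.length stream.toList 0).1

-- ===== PRECONDITION & SPEC =====
def Spec_check_and_count_groups (stream : String) (out : Int) : Prop := out = check_and_count_groups_alt stream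
instance (stream : String) (out : Int) : Decidable (Spec_check_and_count_groups stream out) := by unfold Spec_check_and_count_groups; infer_instance

-- ===== CLAIM (what is proved, stated in full; the proofs are below) =====
def Claim_equal_check_and_count_groups : Prop := ∀ (stream : String), Dom_check_and_count_groups stream → Spec_check_and_count_groups stream (check_and_count_groups stream)

-- ===== LEMMAS AND PROOFS =====

-- the common specification: score of s when d groups are currently open
def specF : List Char → Nat → Int
  | [], _ => 0
  | c :: r, d =>
    if c = '{' then specF r (d + 1)
    else if c = '}' then
      match d with
      | 0 => specF r 0
      | e + 1 => ((e : Int) + 1) + specF r e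
    else specF r d

-- continuation score after parseB returns at depth d
def contF (d : Nat) (r : List Char) : Int :=
  match d with
  | 0 => 0
  | e + 1 => specF r e

theorem contF_succ (e : Nat) (r : List Char) : contF (e + 1) r = specF r e := rfl

theorem loopA_spec (s : List Char) : ∀ (stack : List Char) (count : Int),
    loopA s stack count (stack.length : Int) = count + specF s stack.length := by
  induction s with
  | nil => intro stack count; simp [loopA, specF]
  | cons c rest ih =>
    intro stack count
    by_cases hc : c = '{'
    · have h1 : ((stack.length : Int) + 1) = (((stack ++ [c]).length : Nat) : Int) := by
        simp
      simp only [loopA, specF, hc, if_true, h1]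
      rw [ih]
      simp
    · by_cases hb : c = '}'
      · cases stack with
        | nil =>
          have h0 := ih [] count
          simp only [List.length_nil, Nat.cast_zero] at h0
          simp only [loopA, specF, hb, ite_true, ite_false, ne_eq,
            not_true_eq_false, List.length_nil, Nat.cast_zero]
          simpa using h0
        | cons a t =>
          have hne : (a :: t) ≠ ([] : List Char) := by simp
          simp only [loopA, specF, hb, if_pos hne, ite_true]
          have hlen : ((a :: t).dropLast).length = t.length := by
            simp [List.length_dropLast]
          have hcast : ((a :: t).length : Int) - 1 = (((a :: t).dropLast).length : Int) := by
            rw [hlen]; simp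
          rw [hcast, ih]
          simp only [List.length_cons, hlen]
          push_cast
          ring
      · simp only [loopA, specF, hc, hb, ite_false]
        rw [ih]

theorem parseB_spec : ∀ (f : Nat) (s : List Char) (d : Nat), s.length ≤ f →
    (parseB f s (d : Int)).2.length ≤ s.length ∧
    specF s d = (parseB f s (d : Int)).1 + contF d (parseB f s (d : Int)).2 := by
  intro f
  induction f with
  | zero =>
    intro s d hs
    have : s = [] := by cases s <;> simp_all
    subst this
    cases d <;> simp [parseB, specF, contF]
  | succ f ih =>
    intro s d hs
    cases s with
    | nil => cases d <;> simp [parseB, specF, contF]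
    | cons c rest =>
      have hr : rest.length ≤ f := by simpa using hs
      by_cases hc : c = '{'
      · have hcast : (d : Int) + 1 = ((d + 1 : Nat) : Int) := by push_cast; ring
        obtain ⟨ih1, ih2⟩ := ih rest (d + 1) hr
        obtain ⟨ih3, ih4⟩ := ih (parseB f rest ((d + 1 : Nat) : Int)).2 d (le_trans ih1 hr)
        constructor
        · simp only [parseB, if_pos hc, hcast]
          simpa using le_trans ih3 (le_trans ih1 (Nat.le_succ_of_le le_rfl))
        · simp only [specF, if_pos hc, parseB, hcast]
          rw [ih2, contF_succ, ih4]
          ring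
      · by_cases hd : c = '}' ∧ 0 < (d : Int)
        · obtain ⟨hb, hpos⟩ := hd
          obtain ⟨e, he⟩ : ∃ e, d = e + 1 := by
            cases d with
            | zero => simp at hpos
            | succ e => exact ⟨e, rfl⟩
          subst he
          have hcond : c = '}' ∧ 0 < ((e + 1 : Nat) : Int) := ⟨hb, by positivity⟩
          have hp : parseB (f + 1) (c :: rest) ((e + 1 : Nat) : Int) = (((e + 1 : Nat) : Int), rest) := by
            simp only [parseB]
            rw [if_neg hc, if_pos hcond]
          constructor
          · rw [hp]; simp
          · rw [hp, contF_succ]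
            simp only [specF, hb, ite_true]
            push_cast
            ring
        · obtain ⟨ih1, ih2⟩ := ih rest d hr
          constructor
          · simp only [parseB, if_neg hc, if_neg hd]
            exact le_trans ih1 (Nat.le_succ_of_le le_rfl)
          · by_cases hb : c = '}'
            · have hd0 : d = 0 := by
                by_contra h
                exact hd ⟨hb, by omega⟩
              subst hd0
              simp only [parseB, specF, hb, ite_true]
              simpa [contF] using ih2
            · simp only [parseB, if_neg hc, if_neg hd, specF, if_neg hb]
              exact ih2

-- ===== VERDICT (by name: the statement is the Claim_ definition above) =====
theorem check_and_count_groups_spec : Claim_equal_check_and_count_groups := by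
  intro stream _
  unfold Spec_check_and_count_groups check_and_count_groups check_and_count_groups_alt
  have hA := loopA_spec stream.toList [] 0
  have hB := (parseB_spec stream.toList.length stream.toList 0 le_rfl).2
  simp only [List.length_nil, Nat.cast_zero, zero_add] at hA
  simp only [contF] at hB
  rw [hA, hB]
  push_cast
  ring
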